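-- pv_equiv track=rewrite | github.com/JuanPabloDaza/Simulador-Computador-Cuantico | Observables y medidas.py | crearunitaria
-- ===== SOURCE A (Python) =====
-- def crearunitaria(n):#Funcion para crear una matriz unitaria con tamano nxn
--     unitaria = []
--     for i in range(n):
--         fila = []
--         for j in range(n):
--             if j == i:
--                 fila += [(1,1)]
--             else:
--                 fila += [(0, 0)]
--         unitaria.append(fila)
--     return unitaria
-- ===== SOURCE B (Python) =====
-- def crearunitaria(n):
--     # Circulant construction: build the first basis row e0 once, then obtain
--     # every further row by cyclically rotating the previous row right by one.
--     unitaria = []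
--     fila = [(1, 1)] + [(0, 0)] * (n - 1)
--     for _ in range(n):
--         unitaria.append(fila)
--         fila = fila[-1:] + fila[:-1]
--     return unitaria
-- ===== Notes on version B (the rewrite author's own statement) =====
-- stated objective: alternative
-- what changed: Replaces the nested per-cell j==i loops by a circulant construction: the first basis row e0 is built once and each subsequent row is the cyclic right rotation of the previous one.
import Mathlib
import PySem

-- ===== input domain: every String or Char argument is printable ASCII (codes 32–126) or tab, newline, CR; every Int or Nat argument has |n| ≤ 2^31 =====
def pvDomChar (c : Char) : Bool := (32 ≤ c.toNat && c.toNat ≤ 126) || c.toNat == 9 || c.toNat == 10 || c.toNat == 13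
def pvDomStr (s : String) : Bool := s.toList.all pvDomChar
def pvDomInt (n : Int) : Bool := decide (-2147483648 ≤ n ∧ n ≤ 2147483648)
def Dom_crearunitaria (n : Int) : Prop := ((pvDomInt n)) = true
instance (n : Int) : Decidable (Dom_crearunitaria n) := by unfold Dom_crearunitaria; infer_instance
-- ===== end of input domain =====

-- B builds the first basis row e0 once and obtains each further row by cyclic right
-- rotation of the previous one, instead of A's nested per-cell j==i loops (objective: alternative).

-- ===== PORT A =====
-- for i in range(n): fila built cell by cell with the j == i test, then appended
def crearunitaria (n : Int) : List (List (Int × Int)) :=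
  (PySem.List.pyRange 0 n 1).foldl
    (fun unitaria i =>
      unitaria ++
        [(PySem.List.pyRange 0 n 1).foldl
          (fun fila j => fila ++ [if j = i then ((1:Int), (1:Int)) else (0, 0)]) []])
    []

-- ===== PORT B =====
-- fila = [(1,1)] + [(0,0)]*(n-1); for _ in range(n): append fila; fila = fila[-1:] + fila[:-1]
def crearunitaria_alt (n : Int) : List (List (Int × Int)) :=
  let fila0 : List (Int × Int) :=
    ((1:Int), (1:Int)) :: PySem.List.pyRepeat [((0:Int), (0:Int))] (n - 1)
  ((PySem.List.pyRange 0 n 1).foldl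
    (fun (p : List (List (Int × Int)) × List (Int × Int)) _ =>
      (p.1 ++ [p.2],
       PySem.List.slice p.2 (some (-1)) none ++ PySem.List.slice p.2 none (some (-1))))
    ([], fila0)).1

-- ===== PRECONDITION & SPEC =====
def Spec_crearunitaria (n : Int) (out : List (List (Int × Int))) : Prop := out = crearunitaria_alt n
instance (n : Int) (out : List (List (Int × Int))) : Decidable (Spec_crearunitaria n out) := by unfold Spec_crearunitaria; infer_instance

-- ===== CLAIM =====
def Claim_equal_crearunitaria : Prop := ∀ (n : Int), Dom_crearunitaria n → Spec_crearunitaria n (crearunitaria n)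

-- ===== LEMMAS AND PROOFS =====

-- row i of the n×n identity, and the closed form both ports are reduced to
def pvRow (N i : Nat) : List (Int × Int) :=
  (List.range N).map (fun j => if j = i then ((1:Int), (1:Int)) else (0, 0))

def pvIdent (N : Nat) : List (List (Int × Int)) := (List.range N).map (pvRow N)

theorem pv_foldl_push {α β : Type} (f : α → β) (xs : List α) (acc : List β) :
    xs.foldl (fun a x => a ++ [f x]) acc = acc ++ xs.map f := by
  induction xs generalizing acc with
  | nil => simp
  | cons x xs ih => simp [List.foldl, ih]

theorem pv_A_eq (n : Int) : crearunitaria n = pvIdent n.toNat := by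
  unfold crearunitaria pvIdent pvRow
  have hr : PySem.List.pyRange 0 n 1 = (List.range n.toNat).map (fun k : Nat => (k : Int)) := by
    rw [PySem.List.pyRange_one]; simp
  rw [pv_foldl_push]
  simp only [List.nil_append, hr, List.map_map, Function.comp_def, pv_foldl_push,
    List.nil_append]
  apply List.map_congr_left
  intro i _
  apply List.map_congr_left
  intro j _
  by_cases h : j = i
  · simp [h]
  · have : ((j : Int) ≠ (i : Int)) := by exact_mod_cast h
    simp [h, this]

theorem pv_row_length (N i : Nat) : (pvRow N i).length = N := by simp [pvRow]

-- fila[-1:] + fila[:-1] rotates e_i to e_(i+1)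
theorem pv_rot_row (N i : Nat) (h : i + 1 < N) :
    PySem.List.slice (pvRow N i) (some (-1)) none ++
      PySem.List.slice (pvRow N i) none (some (-1)) = pvRow N (i + 1) := by
  obtain ⟨M, rfl⟩ : ∃ M, N = M + 1 := ⟨N - 1, by omega⟩
  have hM : i < M := by omega
  rw [PySem.List.slice_from_neg_one, PySem.List.slice_to_neg_one, pv_row_length]
  unfold pvRow
  rw [List.range_succ, List.map_append, List.map_singleton]
  have hMi : M ≠ i := by omega
  have hlen : (List.map (fun j => if j = i then ((1:Int),(1:Int)) else ((0:Int),(0:Int)))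
      (List.range M)).length = M := by simp
  rw [Nat.add_sub_cancel, List.drop_left' hlen, List.dropLast_concat]
  apply List.ext_getElem
  · simp
  · intro k h1 h2
    rcases Nat.eq_zero_or_pos k with hk0 | hkpos
    · subst hk0
      have hM0 : 0 < M := by omega
      have h0 : (0 : Nat) ≠ i + 1 := by omega
      simp [List.getElem_append, hMi, hM0, h0]
    · have hkM : k < M + 1 := by simpa using h1
      obtain ⟨j, rfl⟩ : ∃ j, k = j + 1 := ⟨k - 1, by omega⟩
      simp only [List.getElem_append, List.length_singleton]
      by_cases hjM : j + 1 < M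
      · simp [hjM, Nat.succ_inj]
      · obtain rfl : M = j + 1 := by omega
        simp [Nat.succ_inj]

-- the rotation loop invariant: after k of N steps the accumulator holds rows 0..k-1
theorem pv_loop_inv (N : Nat) (hN : 1 ≤ N) : ∀ k : Nat, k ≤ N →
    (PySem.List.pyRange 0 (k : Int) 1).foldl
      (fun (p : List (List (Int × Int)) × List (Int × Int)) _ =>
        (p.1 ++ [p.2],
         PySem.List.slice p.2 (some (-1)) none ++ PySem.List.slice p.2 none (some (-1))))
      ([], pvRow N 0)
    = ((List.range k).map (pvRow N),
       if k < N then pvRow N k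
       else PySem.List.slice (pvRow N (N - 1)) (some (-1)) none ++
            PySem.List.slice (pvRow N (N - 1)) none (some (-1))) := by
  intro k
  induction k with
  | zero =>
    intro _
    rw [PySem.List.pyRange_one_eq_nil (by omega)]
    simp only [List.foldl_nil, List.range_zero, List.map_nil]
    rw [if_pos (by omega)]
  | succ k ih =>
    intro hk
    have hkN : k < N := by omega
    have hcast : ((k : Int) + 1) = (((k + 1 : Nat)) : Int) := by push_cast; ring
    rw [← hcast, PySem.List.pyRange_one_succ_right (by omega), List.foldl_append,
      ih (by omega)]
    simp only [List.foldl_cons, List.foldl_nil, hkN, if_true]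
    rw [Prod.mk.injEq]
    constructor
    · rw [List.range_succ, List.map_append]; simp
    · by_cases h2 : k + 1 < N
      · rw [if_pos h2, pv_rot_row N k h2]
      · have hkeq : k = N - 1 := by omega
        rw [if_neg h2, hkeq]

theorem pv_row0_eq (N : Nat) (hN : 1 ≤ N) :
    pvRow N 0 = ((1:Int), (1:Int)) :: List.replicate (N - 1) ((0:Int), (0:Int)) := by
  obtain ⟨M, rfl⟩ : ∃ M, N = M + 1 := ⟨N - 1, by omega⟩
  unfold pvRow
  rw [List.range_succ_eq_map]
  simp only [List.map_cons, if_pos rfl, List.map_map, Function.comp_def, Nat.succ_ne_zero,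
    if_false]
  rw [List.map_const']
  simp

theorem pv_B_eq (n : Int) : crearunitaria_alt n = pvIdent n.toNat := by
  unfold crearunitaria_alt
  by_cases hn : n ≤ 0
  · rw [PySem.List.pyRange_one_eq_nil hn]
    have : n.toNat = 0 := by omega
    simp [this, pvIdent]
  · have hN : 1 ≤ n.toNat := by omega
    have harg : (n - 1).toNat = n.toNat - 1 := by omega
    have hfila : ((1:Int), (1:Int)) :: PySem.List.pyRepeat [((0:Int), (0:Int))] (n - 1)
        = pvRow n.toNat 0 := by
      rw [PySem.List.pyRepeat_singleton, harg, pv_row0_eq n.toNat hN]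
    have hrange : PySem.List.pyRange 0 n 1 = PySem.List.pyRange 0 ((n.toNat : Nat) : Int) 1 := by
      congr 1
      omega
    simp only [hfila, hrange]
    rw [pv_loop_inv n.toNat hN n.toNat (le_refl _)]
    simp [pvIdent]

-- ===== VERDICT =====
theorem crearunitaria_spec : Claim_equal_crearunitaria := by
  intro n _
  unfold Spec_crearunitaria
  rw [pv_A_eq, pv_B_eq]
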